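-- pv_equiv track=rewrite | github.com/alancast/LeetCodeProblems | python/medium/1726_tupleSameProduct.py | tupleSameProductFrequencyCount
-- ===== SOURCE A (Python) =====
-- from typing import List
--
-- def tupleSameProductFrequencyCount(nums: List[int]) -> int:
--     products = []
--
--     for i in range(len(nums)):
--         for j in range(i+1, len(nums)):
--             products.append(nums[i] * nums[j])
--
--     products.sort()
--
--     total_number_of_tuples = 0
--     last_product_seen = -1
--     same_product_count = 0
--
--     # Iterate over products to count how many times each product occurs
--     for product_index in range(len(products)):
--         if products[product_index] == last_product_seen:
--             # Increment the count of same products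
--             same_product_count += 1
--         else:
--             # Calculate how many pairs had the previous product value
--             pairs_of_equal_product = (((same_product_count - 1) * same_product_count) // 2)
--
--             total_number_of_tuples += 8 * pairs_of_equal_product
--
--             # Update last_product_seen and reset same_product_count
--             last_product_seen = products[product_index]
--             same_product_count = 1
--
--     # Handle the last group of products (since the loop ends without adding it)
--     pairs_of_equal_product = (((same_product_count - 1) * same_product_count) // 2)
--     total_number_of_tuples += 8 * pairs_of_equal_product
--
--     return total_number_of_tuples
-- ===== SOURCE B (Python) =====
-- def tupleSameProductFrequencyCount(nums):
--     counts = {}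
--     for i in range(len(nums)):
--         for j in range(i + 1, len(nums)):
--             p = nums[i] * nums[j]
--             counts[p] = counts.get(p, 0) + 1
--     total = 0
--     for c in counts.values():
--         total += 4 * c * (c - 1)
--     return total
-- ===== Notes on version B (the rewrite author's own statement) =====
-- stated objective: alternative
-- what changed: B replaces A's sort-then-scan run-length grouping of the pairwise products by a single dict count of each product, summing 4*c*(c-1) over the multiplicities; it avoids the sort of the quadratic product list, but in CPython both are dominated by the O(n^2) pair loop (measured ~1.4x, below the 1.5x bar).
import Mathlib
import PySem

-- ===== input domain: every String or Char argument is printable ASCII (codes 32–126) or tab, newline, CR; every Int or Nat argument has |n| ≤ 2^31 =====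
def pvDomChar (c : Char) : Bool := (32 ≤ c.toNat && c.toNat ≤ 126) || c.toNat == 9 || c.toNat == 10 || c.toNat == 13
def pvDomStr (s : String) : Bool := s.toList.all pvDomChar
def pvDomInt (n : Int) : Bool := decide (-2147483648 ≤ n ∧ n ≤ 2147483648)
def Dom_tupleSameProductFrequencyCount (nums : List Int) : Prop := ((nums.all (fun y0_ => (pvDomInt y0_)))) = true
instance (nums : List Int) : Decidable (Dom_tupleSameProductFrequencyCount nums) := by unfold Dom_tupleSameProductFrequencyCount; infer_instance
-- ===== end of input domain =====

-- B counts the pairwise products in a dict and sums 4*c*(c-1) over the multiplicities,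
-- instead of A's sort-and-scan run-length grouping of the product list.

-- ===== PORT A =====
def tupleSameProductFrequencyCount (nums : List Int) : Int :=
  let products :=
    (PySem.List.pyRange 0 (nums.length : Int)).foldl (fun acc i =>
      (PySem.List.pyRange (i + 1) (nums.length : Int)).foldl (fun acc j =>
        acc ++ [PySem.List.pyGetD nums i 0 * PySem.List.pyGetD nums j 0]) acc) []
  let sortedProducts := PySem.List.sorted products (fun x => x)
  let st := sortedProducts.foldl (fun st p =>
      if p = st.2.1 then (st.1, st.2.1, st.2.2 + 1)
      else (st.1 + 8 * PySem.Int.floordiv ((st.2.2 - 1) * st.2.2) 2, p, 1))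
    ((0 : Int), (-1 : Int), (0 : Int))
  st.1 + 8 * PySem.Int.floordiv ((st.2.2 - 1) * st.2.2) 2

-- ===== PORT B =====
def tupleSameProductFrequencyCount_alt (nums : List Int) : Int :=
  let counts :=
    (PySem.List.pyRange 0 (nums.length : Int)).foldl (fun d i =>
      (PySem.List.pyRange (i + 1) (nums.length : Int)).foldl (fun d j =>
        let p := PySem.List.pyGetD nums i 0 * PySem.List.pyGetD nums j 0
        d.insert p (d.getD p 0 + 1)) d) PySem.Dict.empty
  counts.values.foldl (fun total c => total + 4 * c * (c - 1)) 0

-- ===== PRECONDITION & SPEC =====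
def Spec_tupleSameProductFrequencyCount (nums : List Int) (out : Int) : Prop := out = tupleSameProductFrequencyCount_alt nums
instance (nums : List Int) (out : Int) : Decidable (Spec_tupleSameProductFrequencyCount nums out) := by unfold Spec_tupleSameProductFrequencyCount; infer_instance

-- ===== CLAIM (what is proved, stated in full; the proofs are below) =====
def Claim_equal_tupleSameProductFrequencyCount : Prop := ∀ (nums : List Int), Dom_tupleSameProductFrequencyCount nums → Spec_tupleSameProductFrequencyCount nums (tupleSameProductFrequencyCount nums)

-- ===== LEMMAS AND PROOFS =====

-- the contribution of a product occurring m times: 8 * C(m,2) = 4*m*(m-1)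
def pvF (m : Int) : Int := 4 * m * (m - 1)

-- the list of pairwise products, flattened
def pvProds (nums : List Int) : List Int :=
  (PySem.List.pyRange 0 (nums.length : Int)).flatMap (fun i =>
    (PySem.List.pyRange (i + 1) (nums.length : Int)).map (fun j =>
      PySem.List.pyGetD nums i 0 * PySem.List.pyGetD nums j 0))

-- the common value: sum of pvF over the multiplicities of the distinct products
def pvSum (l : List Int) : Int :=
  ((PySem.Set.ofList l).map (fun k => pvF ((l.count k : Int)))).sum

lemma pvF_eq (m : Int) : 8 * PySem.Int.floordiv ((m - 1) * m) 2 = pvF m := by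
  have he : Even ((m - 1) * m) := by simpa using Int.even_mul_succ_self (m - 1)
  obtain ⟨k, hk⟩ := he
  rw [PySem.Int.floordiv_eq_ediv_of_pos (by norm_num), hk]
  have h2 : (k + k) / 2 = k := by omega
  rw [h2]; unfold pvF; linear_combination -4 * hk

lemma pvSum_nil : pvSum [] = 0 := by rfl

-- A's products accumulator is pvProds
lemma pvProdsA (nums : List Int) :
    (PySem.List.pyRange 0 (nums.length : Int)).foldl (fun acc i =>
      (PySem.List.pyRange (i + 1) (nums.length : Int)).foldl (fun acc j =>
        acc ++ [PySem.List.pyGetD nums i 0 * PySem.List.pyGetD nums j 0]) acc) []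
    = pvProds nums := by
  unfold pvProds
  simp only [PySem.List.foldl_append_singleton_eq_map]
  rw [PySem.List.foldl_append_eq_flatMap]
  rfl

-- B's dict is the counter of pvProds
lemma pvCountsB (nums : List Int) :
    (PySem.List.pyRange 0 (nums.length : Int)).foldl (fun d i =>
      (PySem.List.pyRange (i + 1) (nums.length : Int)).foldl (fun d j =>
        let p := PySem.List.pyGetD nums i 0 * PySem.List.pyGetD nums j 0
        d.insert p (d.getD p 0 + 1)) d) PySem.Dict.empty
    = PySem.Dict.counter (pvProds nums) := by
  rw [← PySem.Dict.foldl_insert_getD_add_one_eq_counter]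
  unfold pvProds
  rw [List.foldl_flatMap]
  simp only [List.foldl_map]

-- extract one key's contribution from pvSum
lemma pvSum_extract (l : List Int) (a : Int) :
    pvSum l = pvF ((l.count a : Int)) + pvSum (l.filter (fun y => y != a)) := by
  by_cases hmem : a ∈ l
  · have h1 : (PySem.Set.ofList l).Perm (a :: (PySem.Set.ofList l).erase a) :=
      List.perm_cons_erase ((PySem.Set.mem_ofList _ _).2 hmem)
    unfold pvSum
    rw [((h1.map (fun k => pvF ((l.count k : Int))))).sum_eq]
    simp only [List.map_cons, List.sum_cons]
    congr 1
    have h2 : ((PySem.Set.ofList l).erase a).Perm (PySem.Set.ofList (l.filter (fun y => y != a))) := by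
      rw [List.perm_ext_iff_of_nodup ((PySem.Set.nodup_ofList _).erase _) (PySem.Set.nodup_ofList _)]
      intro k
      rw [(PySem.Set.nodup_ofList l).mem_erase_iff]
      simp [PySem.Set.mem_ofList, List.mem_filter, and_comm]
    rw [(h2.map (fun k => pvF ((l.count k : Int)))).sum_eq]
    apply congrArg
    apply List.map_congr_left
    intro k hk
    have hka : k ≠ a := by
      have := (PySem.Set.mem_ofList _ _).1 hk
      simpa using (List.mem_filter.1 this).2
    rw [List.count_filter (by simpa using hka)]
  · have h0 : l.count a = 0 := List.count_eq_zero.2 hmem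
    have hf : l.filter (fun y => y != a) = l := by
      apply List.filter_eq_self.2
      intro y hy
      simp only [bne_iff_ne, ne_eq]
      intro h; exact hmem (h ▸ hy)
    rw [h0, hf]
    simp [pvF]

lemma pvSum_perm (l₁ l₂ : List Int) (h : l₁.Perm l₂) : pvSum l₁ = pvSum l₂ := by
  unfold pvSum
  have hmap : (PySem.Set.ofList l₁).map (fun k => pvF ((l₁.count k : Int)))
      = (PySem.Set.ofList l₁).map (fun k => pvF ((l₂.count k : Int))) := by
    apply List.map_congr_left
    intro k _
    rw [h.count_eq]
  rw [hmap]
  have hperm : (PySem.Set.ofList l₁).Perm (PySem.Set.ofList l₂) := by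
    rw [List.perm_ext_iff_of_nodup (PySem.Set.nodup_ofList _) (PySem.Set.nodup_ofList _)]
    intro a
    simp [PySem.Set.mem_ofList, h.mem_iff]
  exact (hperm.map _).sum_eq

-- the sorted run-length scan of A: starting in the middle of a run of `last` of length c so far
lemma pvScan (s : List Int) (hs : List.Pairwise (· ≤ ·) s) :
    ∀ (t last c : Int), (∀ y ∈ s, last ≤ y) →
    (let r := s.foldl (fun st p =>
        if p = st.2.1 then (st.1, st.2.1, st.2.2 + 1)
        else (st.1 + 8 * PySem.Int.floordiv ((st.2.2 - 1) * st.2.2) 2, p, 1)) (t, last, c);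
     r.1 + 8 * PySem.Int.floordiv ((r.2.2 - 1) * r.2.2) 2)
    = t + pvF (c + (s.count last : Int)) + pvSum (s.filter (fun y => y != last)) := by
  induction s with
  | nil =>
    intro t last c _
    simp only [List.foldl_nil, List.count_nil, List.filter_nil, pvSum_nil]
    rw [pvF_eq]
    push_cast
    simp
  | cons p rest ih =>
    have hrest : List.Pairwise (· ≤ ·) rest := hs.of_cons
    have hple : ∀ y ∈ rest, p ≤ y := fun y hy => List.rel_of_pairwise_cons hs hy
    intro t last c hlast
    simp only [List.foldl_cons]
    by_cases hp : p = last
    · subst hp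
      rw [if_pos rfl]
      have := ih hrest t p (c + 1) hple
      simp only at this
      rw [this]
      simp only [List.count_cons, List.filter_cons]
      push_cast
      simp
      ring_nf
    · simp only [if_neg hp]
      have hlp : last < p := lt_of_le_of_ne (hlast p (List.mem_cons_self ..)) (Ne.symm hp)
      have := ih hrest (t + 8 * PySem.Int.floordiv ((c - 1) * c) 2) p 1 hple
      simp only at this
      rw [this, pvF_eq]
      have hnm : last ∉ p :: rest := by
        intro hmem
        rcases List.mem_cons.1 hmem with h | h
        · exact hp h.symm
        · exact absurd (hple last h) (not_le.2 hlp)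
      have hcount : (p :: rest).count last = 0 := List.count_eq_zero.2 hnm
      have hfilter : (p :: rest).filter (fun y => y != last) = p :: rest := by
        apply List.filter_eq_self.2
        intro y hy
        simp only [bne_iff_ne, ne_eq]
        intro h; exact hnm (h ▸ hy)
      rw [hcount, hfilter, pvSum_extract (p :: rest) p]
      simp only [List.count_cons, List.filter_cons]
      push_cast
      simp
      ring_nf

-- A's whole scan (initial state (0, -1, 0)) of a sorted list computes pvSum
lemma pvScanTop (s : List Int) (hs : List.Pairwise (· ≤ ·) s) :
    (let r := s.foldl (fun st p =>
        if p = st.2.1 then (st.1, st.2.1, st.2.2 + 1)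
        else (st.1 + 8 * PySem.Int.floordiv ((st.2.2 - 1) * st.2.2) 2, p, 1))
      ((0 : Int), (-1 : Int), (0 : Int));
     r.1 + 8 * PySem.Int.floordiv ((r.2.2 - 1) * r.2.2) 2) = pvSum s := by
  cases s with
  | nil =>
    simp only [List.foldl_nil, pvSum_nil]
    rw [pvF_eq]
    simp [pvF]
  | cons p rest =>
    have hrest : List.Pairwise (· ≤ ·) rest := hs.of_cons
    have hple : ∀ y ∈ rest, p ≤ y := fun y hy => List.rel_of_pairwise_cons hs hy
    by_cases hm : p = (-1 : Int)
    · have hall : ∀ y ∈ p :: rest, (-1 : Int) ≤ y := by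
        intro y hy
        rcases List.mem_cons.1 hy with h | h
        · omega
        · have := hple y h; omega
      have := pvScan (p :: rest) hs 0 (-1) 0 hall
      simp only at this
      rw [this, pvSum_extract (p :: rest) (-1)]
      ring_nf
    · simp only [List.foldl_cons, if_neg hm]
      have := pvScan rest hrest (0 + 8 * PySem.Int.floordiv (((0 : Int) - 1) * 0) 2) p 1 hple
      simp only at this
      rw [this, pvF_eq, pvSum_extract (p :: rest) p]
      simp only [List.count_cons, List.filter_cons]
      push_cast
      simp
      ring_nf
      simp [pvF]

-- ===== VERDICT (by name: the statement is the Claim_ definition above) =====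
theorem tupleSameProductFrequencyCount_spec : Claim_equal_tupleSameProductFrequencyCount := by
  intro nums _
  unfold Spec_tupleSameProductFrequencyCount
  show tupleSameProductFrequencyCount nums = tupleSameProductFrequencyCount_alt nums
  unfold tupleSameProductFrequencyCount tupleSameProductFrequencyCount_alt
  simp only [pvProdsA, pvCountsB]
  have hA := pvScanTop (PySem.List.sorted (pvProds nums) (fun x => x))
    (by simpa using PySem.List.sorted_pairwise (pvProds nums) (fun x => x))
  simp only at hA
  rw [hA]
  rw [pvSum_perm _ _ (PySem.List.sorted_perm (pvProds nums) (fun x => x) false)]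
  -- B side: values of the counter, summed
  have hv : (PySem.Dict.counter (pvProds nums)).values
      = (PySem.Set.ofList (pvProds nums)).map (fun k => (((pvProds nums).count k : Nat) : Int)) := by
    show ((PySem.Dict.counter (pvProds nums)).items.map Prod.snd) = _
    rw [PySem.Dict.items_counter]
    simp [List.map_map, Function.comp]
  rw [hv, PySem.List.foldl_add]
  unfold pvSum pvF
  rw [List.map_map, zero_add]
  rfl
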